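-- pv_equiv track=rewrite | github.com/simopur/lautalaskin-web | lautajako.py | etsi_reitit_f
-- ===== SOURCE A (Python) =====
-- def etsi_reitit_f(n_idx, reitti, max_l, pisteet, sallitut):
--     if pisteet[-1] - pisteet[n_idx] <= max_l:
--         if n_idx != len(pisteet) - 2: return [reitti + [len(pisteet)-1]]
--     res = []
--     for s_idx in sallitut:
--         if s_idx > n_idx:
--             pala = pisteet[s_idx] - pisteet[n_idx]
--             if pala <= max_l and s_idx - n_idx >= 2:
--                 t = etsi_reitit_f(s_idx, reitti + [s_idx], max_l, pisteet, sallitut)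
--                 if t: res.extend(t)
--     return res
-- ===== SOURCE B (Python) =====
-- def etsi_reitit_f(n_idx, reitti, max_l, pisteet, sallitut):
--     # Iterative DFS with an explicit stack instead of recursion; same output order.
--     res = []
--     stack = [(n_idx, reitti)]
--     while stack:
--         i, r = stack.pop()
--         if pisteet[-1] - pisteet[i] <= max_l and i != len(pisteet) - 2:
--             res.append(r + [len(pisteet) - 1])
--             continue
--         for s in reversed(sallitut):
--             if s > i and pisteet[s] - pisteet[i] <= max_l and s - i >= 2:
--                 stack.append((s, r + [s]))
--     return res
-- ===== Notes on version B (the rewrite author's own statement) =====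
-- stated objective: alternative
-- what changed: Replaces A's recursive backtracking with an explicit iterative DFS over a worklist stack of (index, route-prefix) states, pushing allowed successors in reverse so the output list comes out in A's exact order.
import Mathlib
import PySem

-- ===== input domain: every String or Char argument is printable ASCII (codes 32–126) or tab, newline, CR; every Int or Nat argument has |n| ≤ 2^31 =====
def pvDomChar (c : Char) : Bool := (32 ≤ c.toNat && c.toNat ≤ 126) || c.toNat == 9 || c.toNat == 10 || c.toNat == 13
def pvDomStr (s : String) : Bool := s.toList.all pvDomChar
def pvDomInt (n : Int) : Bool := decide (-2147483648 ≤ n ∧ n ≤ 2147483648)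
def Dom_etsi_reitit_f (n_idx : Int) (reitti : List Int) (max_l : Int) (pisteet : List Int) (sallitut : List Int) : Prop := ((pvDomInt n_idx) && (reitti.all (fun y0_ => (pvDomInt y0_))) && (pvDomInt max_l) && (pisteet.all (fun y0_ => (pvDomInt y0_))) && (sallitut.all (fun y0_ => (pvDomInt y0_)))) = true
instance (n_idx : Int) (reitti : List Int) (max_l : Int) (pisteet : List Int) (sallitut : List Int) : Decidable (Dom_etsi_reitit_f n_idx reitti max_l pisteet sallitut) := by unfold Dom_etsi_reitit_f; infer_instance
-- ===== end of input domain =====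

-- B replaces A's recursion by an explicit iterative DFS over a worklist stack, pushing successors
-- in reverse so results come out in A's exact order (objective: alternative decomposition).

-- termination helper for port A: recursing into s (an allowed successor with n_idx < s)
-- strictly shrinks the number of allowed indices above the current one
theorem pvCountP_lt (l : List Int) (n s : Int) (hs : s ∈ l) (h : n < s) :
    l.countP (fun x => decide (s < x)) < l.countP (fun x => decide (n < x)) := by
  induction l with
  | nil => cases hs
  | cons a t ih =>
    rcases List.mem_cons.mp hs with rfl | hmem
    · have hmono : t.countP (fun x => decide (s < x)) ≤ t.countP (fun x => decide (n < x)) :=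
        List.countP_mono_left (by intro x _ hx; simp at hx ⊢; omega)
      simp [List.countP_cons, h]
      omega
    · have := ih hmem
      by_cases hsa : s < a
      · simp [List.countP_cons, hsa, show n < a by omega]; omega
      · simp [List.countP_cons, hsa]
        by_cases hna : n < a <;> simp [hna] <;> omega

theorem pvMeasAttach (l : List Int) : l.attach.length < l.length + 1 := by
  simp

theorem pvMeasCons {α : Type} (x : α) (l : List α) : l.length < (x :: l).length := by
  simp

-- ===== PORT A =====
mutual
-- literal port of A: early return when the remaining span fits (and we are not at the
-- second-to-last point), otherwise scan sallitut accumulating recursive results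
def etsi_reitit_f (n_idx : Int) (reitti : List Int) (max_l : Int) (pisteet : List Int) (sallitut : List Int) : List (List Int) :=
  if PySem.List.pyGetD pisteet (-1) 0 - PySem.List.pyGetD pisteet n_idx 0 ≤ max_l ∧
     n_idx ≠ (pisteet.length : Int) - 2 then
    [reitti ++ [(pisteet.length : Int) - 1]]
  else
    pvALoop n_idx reitti max_l pisteet sallitut sallitut.attach []
termination_by (sallitut.countP (fun x => decide (n_idx < x)), sallitut.length + 1)
decreasing_by
  exact Prod.Lex.right _ (pvMeasAttach sallitut)

-- A's `for s_idx in sallitut:` loop with its `res` accumulator (attach keeps s ∈ sallitut for termination)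
def pvALoop (n_idx : Int) (reitti : List Int) (max_l : Int) (pisteet : List Int) (sallitut : List Int)
    (rem : List {x // x ∈ sallitut}) (res : List (List Int)) : List (List Int) :=
  match rem with
  | [] => res
  | ⟨s, hmem⟩ :: rest =>
    if hs : n_idx < s then
      if PySem.List.pyGetD pisteet s 0 - PySem.List.pyGetD pisteet n_idx 0 ≤ max_l ∧ 2 ≤ s - n_idx then
        let t := etsi_reitit_f s (reitti ++ [s]) max_l pisteet sallitut
        pvALoop n_idx reitti max_l pisteet sallitut rest (if t ≠ [] then res ++ t else res)
      else pvALoop n_idx reitti max_l pisteet sallitut rest res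
    else pvALoop n_idx reitti max_l pisteet sallitut rest res
termination_by (sallitut.countP (fun x => decide (n_idx < x)), rem.length)
decreasing_by
  · exact Prod.Lex.left _ _ (pvCountP_lt sallitut n_idx s hmem hs)
  · exact Prod.Lex.right _ (pvMeasCons _ rest)
  · exact Prod.Lex.right _ (pvMeasCons _ rest)
  · exact Prod.Lex.right _ (pvMeasCons _ rest)
end

-- ===== PORT B =====
-- termination measure for the worklist: each stack entry (i, r) weighs 4^(number of allowed indices above i)
def pvBWeight (sallitut : List Int) (i : Int) : Nat := 4 ^ (sallitut.countP (fun x => decide (i < x)))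
def pvBMeasure (sallitut : List Int) (stack : List (Int × List Int)) : Nat :=
  (stack.map (fun p => pvBWeight sallitut p.1)).sum

-- splitting a filtered sum / count along a pointwise disjoint disjunction of predicates
theorem pvSplitSum (l : List Int) (p q r : Int → Bool) (f : Int → Nat)
    (h : ∀ x ∈ l, p x = (q x || r x) ∧ (q x = true → r x = false)) :
    ((l.filter p).map f).sum = ((l.filter q).map f).sum + ((l.filter r).map f).sum := by
  induction l with
  | nil => simp
  | cons a t ih =>
    have ha := h a (by simp)
    have ih' := ih (fun x hx => h x (by simp [hx]))
    by_cases hq : q a = true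
    · simp [List.filter_cons, ha.1, hq, ha.2 hq, ih']; omega
    · by_cases hr : r a = true <;>
        simp [List.filter_cons, ha.1, hq, hr, ih'] <;> try omega

theorem pvSplitCount (l : List Int) (p q r : Int → Bool)
    (h : ∀ x ∈ l, p x = (q x || r x) ∧ (q x = true → r x = false)) :
    l.countP p = l.countP q + l.countP r := by
  induction l with
  | nil => simp
  | cons a t ih =>
    have ha := h a (by simp)
    have ih' := ih (fun x hx => h x (by simp [hx]))
    by_cases hq : q a = true
    · simp [List.countP_cons, ha.1, hq, ha.2 hq, ih']; omega
    · by_cases hr : r a = true <;> simp [List.countP_cons, ha.1, hq, hr, ih'] <;> try omega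

theorem pvSumConst (l : List Int) (r : Int → Bool) (f : Int → Nat) (v : Nat)
    (h : ∀ x ∈ l, r x = true → f x = v) :
    ((l.filter r).map f).sum = l.countP r * v := by
  induction l with
  | nil => simp
  | cons a t ih =>
    have ih' := ih (fun x hx => h x (by simp [hx]))
    by_cases hr : r a = true
    · simp [List.filter_cons, List.countP_cons, hr, h a (by simp) hr, ih']; ring
    · simp [List.filter_cons, List.countP_cons, hr, ih']

theorem pvSumPow_lt (L : List Int) (n : Nat) : ∀ (i : Int), L.countP (fun x => decide (i < x)) ≤ n →
    ((L.filter (fun s => decide (i < s))).map (fun s => pvBWeight L s)).sum < pvBWeight L i := by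
  induction n with
  | zero =>
    intro i h
    have hnil : L.filter (fun s => decide (i < s)) = [] := by
      rw [List.filter_eq_nil_iff]
      intro a ha
      have := List.countP_eq_zero.mp (Nat.le_zero.mp h) a ha
      simpa using this
    simp [hnil, pvBWeight]
  | succ n ih =>
    intro i h
    cases hF : (L.filter (fun s => decide (i < s))).min? with
    | none =>
      have hnil := List.min?_eq_none_iff.mp hF
      simp [hnil, pvBWeight]
    | some m =>
      have hmF : m ∈ L.filter (fun s => decide (i < s)) := List.min?_mem hF
      have hmin : ∀ b ∈ L.filter (fun s => decide (i < s)), m ≤ b :=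
        (List.min?_eq_some_iff.mp hF).2
      have hmL : m ∈ L := (List.mem_filter.mp hmF).1
      have him : i < m := by have := (List.mem_filter.mp hmF).2; simpa using this
      have hsplit : ∀ x ∈ L, (decide (i < x)) = ((decide (m < x)) || (decide (x = m))) ∧
          ((decide (m < x)) = true → (decide (x = m)) = false) := by
        intro x hx
        constructor
        · by_cases h1 : i < x
          · have hmx : m ≤ x := hmin x (by simp [List.mem_filter, hx, h1])
            simp only [h1, decide_true]
            rcases lt_or_eq_of_le hmx with h2 | h2
            · simp [h2]
            · simp [h2.symm]
          · have h2 : ¬ m < x := by omega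
            have h3 : ¬ x = m := by omega
            simp [h1, h2, h3]
        · intro h1
          simp at h1 ⊢
          omega
      have hc := pvSplitCount L _ _ _ hsplit
      have hk : 0 < L.countP (fun x => decide (x = m)) :=
        List.countP_pos_iff.mpr ⟨m, hmL, by simp⟩
      have hs := pvSplitSum L _ _ _ (fun s => pvBWeight L s) hsplit
      have hconst := pvSumConst L (fun x => decide (x = m)) (fun s => pvBWeight L s)
        (pvBWeight L m) (fun x _ hx => by simp at hx; rw [hx])
      have hmn : L.countP (fun x => decide (m < x)) ≤ n := by omega
      have IH := ih m hmn
      set cm := L.countP (fun x => decide (m < x)) with hcm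
      set k := L.countP (fun x => decide (x = m)) with hkk
      have hk4 : k + 1 ≤ 4 ^ k := by
        calc k + 1 ≤ 2 ^ k := Nat.lt_two_pow_self
        _ ≤ 4 ^ k := Nat.pow_le_pow_left (by norm_num) k
      have hwm : pvBWeight L m = 4 ^ cm := rfl
      have hwi : pvBWeight L i = 4 ^ cm * 4 ^ k := by
        rw [pvBWeight, hc, pow_add]
      rw [hs, hconst, hwi]
      rw [hwm] at IH
      calc ((L.filter (fun s => decide (m < s))).map (fun s => pvBWeight L s)).sum + k * pvBWeight L m
          < 4 ^ cm + k * 4 ^ cm := by rw [hwm]; omega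
        _ = (k + 1) * 4 ^ cm := by ring
        _ ≤ 4 ^ k * 4 ^ cm := Nat.mul_le_mul_right _ hk4
        _ = 4 ^ cm * 4 ^ k := by ring

-- Source B's inner `for s in reversed(sallitut): if …: stack.append(…)` loop
def pvPush (max_l : Int) (pisteet : List Int) (i : Int) (r : List Int)
    (rem : List Int) (acc : List (Int × List Int)) : List (Int × List Int) :=
  match rem with
  | [] => acc
  | s :: rest =>
    pvPush max_l pisteet i r rest
      (if i < s ∧ PySem.List.pyGetD pisteet s 0 - PySem.List.pyGetD pisteet i 0 ≤ max_l ∧ 2 ≤ s - i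
       then (s, r ++ [s]) :: acc else acc)

theorem pvPush_eq (max_l : Int) (pisteet : List Int) (i : Int) (r : List Int) :
    ∀ (rem : List Int) (acc : List (Int × List Int)),
    pvPush max_l pisteet i r rem acc =
      ((rem.filter (fun s => decide (i < s ∧ PySem.List.pyGetD pisteet s 0 - PySem.List.pyGetD pisteet i 0 ≤ max_l ∧ 2 ≤ s - i))).reverse).map (fun s => (s, r ++ [s])) ++ acc := by
  intro rem
  induction rem with
  | nil => intro acc; simp [pvPush]
  | cons s rest ih =>
    intro acc
    rw [pvPush, List.filter_cons]
    by_cases hc : i < s ∧ PySem.List.pyGetD pisteet s 0 - PySem.List.pyGetD pisteet i 0 ≤ max_l ∧ 2 ≤ s - i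
    · rw [if_pos hc, ih, if_pos (decide_eq_true hc)]
      simp only [List.reverse_cons, List.map_append, List.map_cons, List.map_nil,
        List.append_assoc, List.cons_append, List.nil_append]
    · rw [if_neg hc, ih, if_neg (by simpa using hc)]

theorem pvSumFilterMono (l : List Int) (p q : Int → Bool) (w : Int → Nat)
    (h : ∀ x, p x = true → q x = true) :
    ((l.filter p).map w).sum ≤ ((l.filter q).map w).sum := by
  induction l with
  | nil => simp
  | cons a t ih =>
    by_cases hp : p a = true
    · simp [List.filter_cons, hp, h a hp]; omega
    · by_cases hq : q a = true <;> simp [List.filter_cons, hp, hq] <;> omega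

-- popping a state strictly shrinks the measure
theorem pvPop_lt (sallitut : List Int) (i : Int) (r : List Int) (st : List (Int × List Int)) :
    pvBMeasure sallitut st < pvBMeasure sallitut ((i, r) :: st) := by
  have : 0 < pvBWeight sallitut i := Nat.pow_pos (by norm_num)
  simp only [pvBMeasure, List.map_cons, List.sum_cons]
  omega

-- the push step strictly shrinks the measure (stated on the form Lean's
-- well-founded-recursion preprocessing gives the recursive call)
theorem pvPush_lt (max_l : Int) (pisteet sallitut : List Int) (i : Int) (r : List Int) (st : List (Int × List Int)) :
    pvBMeasure sallitut (pvPush max_l pisteet i r sallitut.attach.reverse.unattach st) < pvBMeasure sallitut ((i, r) :: st) := by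
  simp only [List.unattach_reverse, List.unattach_attach]
  rw [pvPush_eq]
  set F := (sallitut.reverse.filter (fun s => decide (i < s ∧ PySem.List.pyGetD pisteet s 0 - PySem.List.pyGetD pisteet i 0 ≤ max_l ∧ 2 ≤ s - i))).reverse with hF
  have hmono : (F.map (fun s => pvBWeight sallitut s)).sum
      ≤ ((sallitut.filter (fun s => decide (i < s))).map (fun s => pvBWeight sallitut s)).sum := by
    rw [hF, ← List.filter_reverse, List.reverse_reverse]
    exact pvSumFilterMono sallitut _ _ _ (fun x hx => by simp at hx ⊢; omega)
  have hlt := pvSumPow_lt sallitut (sallitut.countP (fun x => decide (i < x))) i le_rfl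
  have hcomp : (F.map (fun s => (s, r ++ [s]))).map (fun p => pvBWeight sallitut p.1)
      = F.map (fun s => pvBWeight sallitut s) := by rw [List.map_map]; rfl
  simp only [pvBMeasure, List.map_cons, List.sum_cons, List.map_append, List.sum_append, hcomp]
  omega

def pvBLoop (max_l : Int) (pisteet : List Int) (sallitut : List Int)
    (stack : List (Int × List Int)) (res : List (List Int)) : List (List Int) :=
  match stack with
  | [] => res
  | (i, r) :: st =>
    if PySem.List.pyGetD pisteet (-1) 0 - PySem.List.pyGetD pisteet i 0 ≤ max_l ∧
       i ≠ (pisteet.length : Int) - 2 then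
      pvBLoop max_l pisteet sallitut st (res ++ [r ++ [(pisteet.length : Int) - 1]])
    else
      pvBLoop max_l pisteet sallitut (pvPush max_l pisteet i r sallitut.reverse st) res
termination_by pvBMeasure sallitut stack
decreasing_by
  · exact pvPop_lt sallitut i r st
  · exact pvPush_lt max_l pisteet sallitut i r st

def etsi_reitit_f_alt (n_idx : Int) (reitti : List Int) (max_l : Int) (pisteet : List Int) (sallitut : List Int) : List (List Int) :=
  pvBLoop max_l pisteet sallitut [(n_idx, reitti)] []

-- ===== PRECONDITION & SPEC =====
-- Pre_ = exactly the inputs where the Python A returns normally: pisteet nonempty, n_idx a valid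
-- index, and either the early-return condition holds (sallitut is never indexed) or every
-- sallitut element above n_idx is a valid index (those are exactly the ones ever dereferenced);
-- outside this A raises IndexError.
def Pre_etsi_reitit_f (n_idx : Int) (reitti : List Int) (max_l : Int) (pisteet : List Int) (sallitut : List Int) : Prop :=
  pisteet ≠ [] ∧ PySem.Raise.InRange pisteet.length n_idx ∧
  ((PySem.List.pyGetD pisteet (-1) 0 - PySem.List.pyGetD pisteet n_idx 0 ≤ max_l ∧
      n_idx ≠ (pisteet.length : Int) - 2) ∨
    ∀ s ∈ sallitut, n_idx < s → PySem.Raise.InRange pisteet.length s)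
instance (n_idx : Int) (reitti : List Int) (max_l : Int) (pisteet : List Int) (sallitut : List Int) : Decidable (Pre_etsi_reitit_f n_idx reitti max_l pisteet sallitut) := by unfold Pre_etsi_reitit_f; infer_instance

def pvWitness_etsi_reitit_f : Int × List Int × Int × List Int × List Int := (0, [], 10, [0, 2, 3, 7], [2])

def Spec_etsi_reitit_f (n_idx : Int) (reitti : List Int) (max_l : Int) (pisteet : List Int) (sallitut : List Int) (out : List (List Int)) : Prop := out = etsi_reitit_f_alt n_idx reitti max_l pisteet sallitut
instance (n_idx : Int) (reitti : List Int) (max_l : Int) (pisteet : List Int) (sallitut : List Int) (out : List (List Int)) : Decidable (Spec_etsi_reitit_f n_idx reitti max_l pisteet sallitut out) := by unfold Spec_etsi_reitit_f; infer_instance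

-- ===== CLAIM (what is proved, stated in full; the proofs are below) =====
def Claim_equal_etsi_reitit_f : Prop := ∀ (n_idx : Int) (reitti : List Int) (max_l : Int) (pisteet : List Int) (sallitut : List Int), Dom_etsi_reitit_f n_idx reitti max_l pisteet sallitut → Pre_etsi_reitit_f n_idx reitti max_l pisteet sallitut → Spec_etsi_reitit_f n_idx reitti max_l pisteet sallitut (etsi_reitit_f n_idx reitti max_l pisteet sallitut)

-- ===== LEMMAS AND PROOFS =====

theorem pvALoop_eq (n_idx : Int) (reitti : List Int) (max_l : Int) (pisteet : List Int) (sallitut : List Int) :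
    ∀ (rem : List {x // x ∈ sallitut}) (res : List (List Int)),
    pvALoop n_idx reitti max_l pisteet sallitut rem res =
      res ++ ((rem.unattach.filter (fun s => decide (n_idx < s ∧ PySem.List.pyGetD pisteet s 0 - PySem.List.pyGetD pisteet n_idx 0 ≤ max_l ∧ 2 ≤ s - n_idx))).map
        (fun s => etsi_reitit_f s (reitti ++ [s]) max_l pisteet sallitut)).flatten := by
  intro rem
  induction rem with
  | nil => intro res; simp [pvALoop]
  | cons x rest ih =>
    intro res
    obtain ⟨s, hmem⟩ := x
    rw [pvALoop, List.unattach_cons, List.filter_cons]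
    by_cases hs : n_idx < s
    · by_cases hin : PySem.List.pyGetD pisteet s 0 - PySem.List.pyGetD pisteet n_idx 0 ≤ max_l ∧ 2 ≤ s - n_idx
      · rw [dif_pos hs, if_pos hin, ih,
            if_pos (decide_eq_true (show n_idx < s ∧ PySem.List.pyGetD pisteet s 0 - PySem.List.pyGetD pisteet n_idx 0 ≤ max_l ∧ 2 ≤ s - n_idx from ⟨hs, hin⟩)),
            List.map_cons, List.flatten_cons]
        by_cases ht : etsi_reitit_f s (reitti ++ [s]) max_l pisteet sallitut = []
        · rw [if_neg (by simp [ht]), ht, List.nil_append]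
        · rw [if_pos ht, List.append_assoc]
      · rw [dif_pos hs, if_neg hin, ih,
            if_neg (by simp only [decide_eq_true_eq]; exact fun h => hin h.2)]
    · rw [dif_neg hs, ih,
          if_neg (by simp only [decide_eq_true_eq]; exact fun h => hs h.1)]

theorem pvA_char (n_idx : Int) (reitti : List Int) (max_l : Int) (pisteet : List Int) (sallitut : List Int) :
    etsi_reitit_f n_idx reitti max_l pisteet sallitut =
      if PySem.List.pyGetD pisteet (-1) 0 - PySem.List.pyGetD pisteet n_idx 0 ≤ max_l ∧ n_idx ≠ (pisteet.length : Int) - 2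
      then [reitti ++ [(pisteet.length : Int) - 1]]
      else ((sallitut.filter (fun s => decide (n_idx < s ∧ PySem.List.pyGetD pisteet s 0 - PySem.List.pyGetD pisteet n_idx 0 ≤ max_l ∧ 2 ≤ s - n_idx))).map
        (fun s => etsi_reitit_f s (reitti ++ [s]) max_l pisteet sallitut)).flatten := by
  rw [etsi_reitit_f]
  split_ifs with h
  · rfl
  · rw [pvALoop_eq]
    simp

theorem pvB_eq (max_l : Int) (pisteet : List Int) (sallitut : List Int) :
    ∀ (stack : List (Int × List Int)) (res : List (List Int)),
    pvBLoop max_l pisteet sallitut stack res =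
      res ++ (stack.map (fun p => etsi_reitit_f p.1 p.2 max_l pisteet sallitut)).flatten := by
  intro stack res
  fun_induction pvBLoop with
  | case1 => simp
  | case2 acc idx route stail hcond ih =>
    rw [ih]
    simp only [List.map_cons, List.flatten_cons]
    rw [pvA_char idx route, if_pos hcond]
    simp
  | case3 acc idx route stail hcond ih =>
    simp only [List.unattach_reverse, List.unattach_attach] at ih
    rw [ih, pvPush_eq, ← List.filter_reverse, List.reverse_reverse]
    simp only [List.map_cons, List.flatten_cons, List.map_append, List.flatten_append, List.map_map]
    rw [pvA_char idx route, if_neg hcond]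
    simp [Function.comp_def]

theorem pvAB_eq (n_idx : Int) (reitti : List Int) (max_l : Int) (pisteet : List Int) (sallitut : List Int) :
    etsi_reitit_f n_idx reitti max_l pisteet sallitut = etsi_reitit_f_alt n_idx reitti max_l pisteet sallitut := by
  rw [etsi_reitit_f_alt, pvB_eq]
  simp

-- ===== VERDICT (by name: the statement is the Claim_ definition above) =====
theorem etsi_reitit_f_spec : Claim_equal_etsi_reitit_f := by
  intro n_idx reitti max_l pisteet sallitut _ _
  unfold Spec_etsi_reitit_f
  exact pvAB_eq n_idx reitti max_l pisteet sallitut
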